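-- pv_equiv track=rewrite | github.com/nextgenusfs/funannotate2 | funannotate2/fastx.py | contig_analysis
-- ===== SOURCE A (Python) =====
-- def list2groups(L):
--     """
--     Identify groups of continuous numbers in a list.
--
--     This function processes a list of numbers and identifies groups of consecutive numbers. It yields a tuple representing the start and end of each group.
--
--     Args:
--         L (list): A list of numbers.
--
--     Yields:
--         tuple: A tuple representing the start and end of each group of continuous numbers.
--     """
--     # via https://stackoverflow.com/questions/2154249/identify-groups-of-continuous-numbers-in-a-list
--     if len(L) < 1:
--         return
--     first = last = L[0]
--     for n in L[1:]:
--         if n - 1 == last:  # Part of the group, bump the end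
--             last = n
--         else:  # Not part of the group, yield current group and start a new
--             yield first, last
--             first = last = n
--     yield first, last  # Yield the last group
--
-- def contig_analysis(title, seq):
--     """
--     Perform analysis on a DNA sequence to identify masked regions and gaps.
--
--     This function examines a DNA sequence to find regions where nucleotides are masked (lowercase) and where gaps (N/n) occur. It uses the `list2groups` function to group consecutive indices of masked regions and gaps.
--
--     Args:
--         title (str): The title of the DNA sequence.
--         seq (str): The DNA sequence to analyze.
--
--     Returns:
--         tuple: A tuple containing:
--             - str: The title of the sequence.
--             - list: Grouped indices of masked regions.
--             - list: Grouped indices of gaps.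
--     """
--     masked = []
--     gaps = []
--     for i, nuc in enumerate(seq):
--         if nuc.islower():
--             masked.append(i)
--         if nuc in ["N", "n"]:
--             gaps.append(i)
--     mask_grouped = list(list2groups(masked))
--     gaps_grouped = list(list2groups(gaps))
--     return (title, mask_grouped, gaps_grouped)
-- ===== SOURCE B (Python) =====
-- def contig_analysis(title, seq):
--     """Single fused pass: build grouped masked/gap ranges directly, no index lists."""
--     masked_runs = []
--     gap_runs = []
--     open_mask = None  # (first, last) of the currently open masked run
--     open_gap = None   # (first, last) of the currently open gap run
--     for i, nuc in enumerate(seq):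
--         if nuc.islower():
--             if open_mask is not None and open_mask[1] + 1 == i:
--                 open_mask = (open_mask[0], i)
--             else:
--                 if open_mask is not None:
--                     masked_runs.append(open_mask)
--                 open_mask = (i, i)
--         if nuc in ("N", "n"):
--             if open_gap is not None and open_gap[1] + 1 == i:
--                 open_gap = (open_gap[0], i)
--             else:
--                 if open_gap is not None:
--                     gap_runs.append(open_gap)
--                 open_gap = (i, i)
--     if open_mask is not None:
--         masked_runs.append(open_mask)
--     if open_gap is not None:
--         gap_runs.append(open_gap)
--     return (title, masked_runs, gap_runs)
-- ===== Notes on version B (the rewrite author's own statement) =====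
-- stated objective: alternative
-- what changed: Single fused pass over enumerate(seq) maintaining open-run state for masked and gap ranges, replacing A's intermediate index lists and the separate list2groups grouping pass.
import Mathlib
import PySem

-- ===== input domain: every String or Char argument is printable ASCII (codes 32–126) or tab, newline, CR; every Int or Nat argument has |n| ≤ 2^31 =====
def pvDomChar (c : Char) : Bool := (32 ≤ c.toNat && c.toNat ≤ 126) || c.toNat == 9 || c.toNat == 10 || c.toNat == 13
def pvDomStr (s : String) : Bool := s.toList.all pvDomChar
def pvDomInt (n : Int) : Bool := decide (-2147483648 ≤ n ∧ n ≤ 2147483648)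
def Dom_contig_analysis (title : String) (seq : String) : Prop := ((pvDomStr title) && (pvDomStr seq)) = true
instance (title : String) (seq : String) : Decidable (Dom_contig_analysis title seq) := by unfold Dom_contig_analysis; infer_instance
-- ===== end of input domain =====

-- B fuses collection and grouping into one pass over enumerate(seq) with per-tracker run state,
-- removing the intermediate index lists and the separate list2groups pass (objective: alternative).
-- ===== PORT A =====
def list2groups_go (first last : Int) : List Int → List (Int × Int)
  | [] => [(first, last)]
  | n :: ns =>
    if n - 1 = last then list2groups_go first n ns
    else (first, last) :: list2groups_go n n ns

def list2groups : List Int → List (Int × Int)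
  | [] => []
  | x :: xs => list2groups_go x x xs

def contig_analysis (title : String) (seq : String) : String × (List (Int × Int)) × (List (Int × Int)) :=
  let st := (PySem.List.enumerate seq.toList).foldl
    (fun (mg : List Int × List Int) (p : Int × Char) =>
      let mg := if PySem.Chars.islower p.2 then (mg.1 ++ [p.1], mg.2) else mg
      if p.2 = 'N' ∨ p.2 = 'n' then (mg.1, mg.2 ++ [p.1]) else mg)
    ([], [])
  (title, list2groups st.1, list2groups st.2)


-- ===== PORT B =====
-- one tracker step of Source B: extend / close-and-reopen / open the current run at index i
def trkStep (st : List (Int × Int) × Option (Int × Int)) (i : Int) :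
    List (Int × Int) × Option (Int × Int) :=
  match st.2 with
  | some fl => if fl.2 + 1 = i then (st.1, some (fl.1, i)) else (st.1 ++ [fl], some (i, i))
  | none => (st.1, some (i, i))

-- append the still-open run, if any (Source B's post-loop flush)
def trkFlush (st : List (Int × Int) × Option (Int × Int)) : List (Int × Int) :=
  st.1 ++ (match st.2 with | some fl => [fl] | none => [])

def contig_analysis_alt (title : String) (seq : String) : String × (List (Int × Int)) × (List (Int × Int)) :=
  let st := (PySem.List.enumerate seq.toList).foldl
    (fun (st : (List (Int × Int) × Option (Int × Int)) × (List (Int × Int) × Option (Int × Int)))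
         (p : Int × Char) =>
      let m := if PySem.Chars.islower p.2 then trkStep st.1 p.1 else st.1
      let g := if p.2 = 'N' ∨ p.2 = 'n' then trkStep st.2 p.1 else st.2
      (m, g))
    (([], none), ([], none))
  (title, trkFlush st.1, trkFlush st.2)


-- ===== PRECONDITION & SPEC =====
def Spec_contig_analysis (title : String) (seq : String) (out : String × (List (Int × Int)) × (List (Int × Int))) : Prop := out = contig_analysis_alt title seq
instance (title : String) (seq : String) (out : String × (List (Int × Int)) × (List (Int × Int))) : Decidable (Spec_contig_analysis title seq out) := by unfold Spec_contig_analysis; infer_instance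

-- ===== CLAIM (what is proved, stated in full; the proofs are below) =====
def Claim_equal_contig_analysis : Prop := ∀ (title : String) (seq : String), Dom_contig_analysis title seq → Spec_contig_analysis title seq (contig_analysis title seq)

-- ===== LEMMAS AND PROOFS =====
-- A's collecting fold splits into two independent filterMap accumulations
theorem foldA_eq (L : List (Int × Char)) (a b : List Int) :
    L.foldl (fun (mg : List Int × List Int) (p : Int × Char) =>
      let mg := if PySem.Chars.islower p.2 then (mg.1 ++ [p.1], mg.2) else mg
      if p.2 = 'N' ∨ p.2 = 'n' then (mg.1, mg.2 ++ [p.1]) else mg) (a, b)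
    = (a ++ L.filterMap (fun p => if PySem.Chars.islower p.2 then some p.1 else none),
       b ++ L.filterMap (fun p : Int × Char => if p.2 = 'N' ∨ p.2 = 'n' then some p.1 else none)) := by
  induction L generalizing a b with
  | nil => simp
  | cons p L ih =>
    simp only [List.foldl_cons, List.filterMap_cons]
    by_cases hm : PySem.Chars.islower p.2 <;> by_cases hg : p.2 = 'N' ∨ p.2 = 'n' <;>
      simp [hm, hg, ih]

-- B's pairwise fold is the pair of the two independent tracker folds
theorem foldB_eq (L : List (Int × Char)) (m g : List (Int × Int) × Option (Int × Int)) :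
    L.foldl (fun (st : (List (Int × Int) × Option (Int × Int)) × (List (Int × Int) × Option (Int × Int)))
         (p : Int × Char) =>
      let m := if PySem.Chars.islower p.2 then trkStep st.1 p.1 else st.1
      let g := if p.2 = 'N' ∨ p.2 = 'n' then trkStep st.2 p.1 else st.2
      (m, g)) (m, g)
    = (L.foldl (fun st p => if PySem.Chars.islower p.2 then trkStep st p.1 else st) m,
       L.foldl (fun st p => if p.2 = 'N' ∨ p.2 = 'n' then trkStep st p.1 else st) g) := by
  induction L generalizing m g with
  | nil => rfl
  | cons p L ih => simp only [List.foldl_cons, ih]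

-- the guarded masked-tracker fold is the plain tracker fold over the filtered indices
theorem foldTrkM (L : List (Int × Char)) (st : List (Int × Int) × Option (Int × Int)) :
    L.foldl (fun st (p : Int × Char) => if PySem.Chars.islower p.2 then trkStep st p.1 else st) st
    = (L.filterMap (fun p => if PySem.Chars.islower p.2 then some p.1 else none)).foldl trkStep st := by
  induction L generalizing st with
  | nil => rfl
  | cons p L ih => by_cases h : PySem.Chars.islower p.2 <;> simp [h, ih]

-- the guarded gap-tracker fold is the plain tracker fold over the filtered indices
theorem foldTrkG (L : List (Int × Char)) (st : List (Int × Int) × Option (Int × Int)) :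
    L.foldl (fun st (p : Int × Char) => if p.2 = 'N' ∨ p.2 = 'n' then trkStep st p.1 else st) st
    = (L.filterMap (fun p : Int × Char => if p.2 = 'N' ∨ p.2 = 'n' then some p.1 else none)).foldl trkStep st := by
  induction L generalizing st with
  | nil => rfl
  | cons p L ih => by_cases h : p.2 = 'N' ∨ p.2 = 'n' <;> simp [h, ih]

-- the flushed tracker fold over an index list with an open run is list2groups_go
theorem trk_go (L : List Int) (acc : List (Int × Int)) (f l : Int) :
    trkFlush (L.foldl trkStep (acc, some (f, l))) = acc ++ list2groups_go f l L := by
  induction L generalizing acc f l with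
  | nil => simp [trkFlush, list2groups_go]
  | cons n ns ih =>
    simp only [List.foldl_cons, trkStep, list2groups_go]
    by_cases h : l + 1 = n
    · have h' : n - 1 = l := by omega
      simp [h, h', ih]
    · have h' : ¬ n - 1 = l := by omega
      simp [h, h', ih]

-- starting closed, the flushed tracker fold is list2groups
theorem trk_groups (L : List Int) :
    trkFlush (L.foldl trkStep ([], none)) = list2groups L := by
  cases L with
  | nil => rfl
  | cons x xs =>
    simp only [List.foldl_cons, trkStep, list2groups]
    exact trk_go xs [] x x

-- ===== VERDICT (by name: the statement is the Claim_ definition above) =====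
theorem contig_analysis_spec : Claim_equal_contig_analysis := by
  intro title seq _
  unfold Spec_contig_analysis contig_analysis contig_analysis_alt
  rw [foldA_eq, foldB_eq, foldTrkM, foldTrkG]
  simp only [trk_groups, List.nil_append]
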